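-- pv_equiv track=rewrite | github.com/Kardi322/nl-network-optimizer | src/models/optimizer.py | _check_chain_anomaly
-- ===== SOURCE A (Python) =====
-- from typing import Dict, List, Tuple, Optional
--
-- def _check_chain_anomaly(chain: List[str]) -> Optional[str]:
--     """Проверка аномалий в цепочке квалификаций"""
--     if not chain:
--         return None
--
--     # Проверяем инверсию квалификаций
--     qual_ranks = {
--         'NONE': 0, 'M1': 1, 'M2': 2, 'M3': 3,
--         'B1': 4, 'B2': 5, 'B3': 6,
--         'TOP1': 7, 'TOP2': 8, 'TOP3': 9,
--         'TOP4': 10, 'TOP5': 11, 'TOP': 12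
--     }
--
--     # Пропускаем неизвестные квалификации
--     if chain[0] not in qual_ranks:
--         return None
--
--     prev_rank = qual_ranks[chain[0]]
--     inversions = 0
--
--     for qual in chain[1:]:
--         if qual not in qual_ranks:
--             continue
--
--         current_rank = qual_ranks[qual]
--         if current_rank > prev_rank + 2:  # Слишком резкий скачок
--             return 'sharp_increase'
--         elif current_rank < prev_rank - 1:  # Инверсия
--             inversions += 1
--         prev_rank = current_rank
--
--     if inversions > 1:
--         return 'multiple_inversions'
--
--     return None
-- ===== SOURCE B (Python) =====
-- from typing import List, Optional
--
-- _QUAL_RANKS = {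
--     'NONE': 0, 'M1': 1, 'M2': 2, 'M3': 3,
--     'B1': 4, 'B2': 5, 'B3': 6,
--     'TOP1': 7, 'TOP2': 8, 'TOP3': 9,
--     'TOP4': 10, 'TOP5': 11, 'TOP': 12
-- }
--
-- def _check_chain_anomaly(chain: List[str]) -> Optional[str]:
--     if not chain:
--         return None
--     if chain[0] not in _QUAL_RANKS:
--         return None
--     ranks = [_QUAL_RANKS[q] for q in chain if q in _QUAL_RANKS]
--     diffs = [b - a for a, b in zip(ranks, ranks[1:])]
--     if any(d > 2 for d in diffs):
--         return 'sharp_increase'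
--     if sum(1 for d in diffs if d < -1) > 1:
--         return 'multiple_inversions'
--     return None
-- ===== Notes on version B (the rewrite author's own statement) =====
-- stated objective: alternative
-- what changed: Replaces A's stateful early-return loop (prev_rank + inversion counter) with a data-flow decomposition: extract the list of known ranks, build the consecutive-difference list, and answer with two independent reductions (any diff > 2; count of diffs < -1).
import Mathlib
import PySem

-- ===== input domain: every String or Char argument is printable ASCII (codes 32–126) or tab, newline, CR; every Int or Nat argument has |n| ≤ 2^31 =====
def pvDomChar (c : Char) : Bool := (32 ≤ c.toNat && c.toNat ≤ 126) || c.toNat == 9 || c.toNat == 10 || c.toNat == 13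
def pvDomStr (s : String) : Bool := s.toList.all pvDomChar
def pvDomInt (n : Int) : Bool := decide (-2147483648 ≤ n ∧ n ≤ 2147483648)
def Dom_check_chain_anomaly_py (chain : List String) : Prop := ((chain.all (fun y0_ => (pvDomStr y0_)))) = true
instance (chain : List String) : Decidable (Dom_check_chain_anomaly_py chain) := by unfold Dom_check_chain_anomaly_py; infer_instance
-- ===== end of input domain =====

-- B replaces A's stateful early-return loop with a known-ranks list, a consecutive-diff list and two independent reductions (alternative decomposition, same cost).


-- ===== PORT A =====
-- the qual_ranks dict literal (shared by both ports; both Pythons spell out the same table)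
def qualRanks : PySem.Dict String Int := PySem.Dict.ofList
  [("NONE",0),("M1",1),("M2",2),("M3",3),("B1",4),("B2",5),("B3",6),
   ("TOP1",7),("TOP2",8),("TOP3",9),("TOP4",10),("TOP5",11),("TOP",12)]

-- A's 'for qual in chain[1:]' loop with state (prev_rank, inversions) and early return
def chainLoopA (prev inv : Int) : List String → Option String
  | [] => if inv > 1 then some "multiple_inversions" else none
  | q :: rest =>
    match PySem.Dict.get? qualRanks q with
    | none => chainLoopA prev inv rest
    | some r =>
      if r > prev + 2 then some "sharp_increase"
      else chainLoopA r (if r < prev - 1 then inv + 1 else inv) rest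

def check_chain_anomaly_py (chain : List String) : Option String :=
  match chain with
  | [] => none
  | q :: rest =>
    match PySem.Dict.get? qualRanks q with
    | none => none
    | some r => chainLoopA r 0 rest

-- ===== PORT B =====
def check_chain_anomaly_py_alt (chain : List String) : Option String :=
  match chain with
  | [] => none
  | q :: _ =>
    if (PySem.Dict.get? qualRanks q).isNone then none
    else
      let ranks := chain.filterMap (fun s => PySem.Dict.get? qualRanks s)
      let diffs := List.zipWith (fun a b => b - a) ranks ranks.tail
      if diffs.any (fun d => decide (d > 2)) then some "sharp_increase"
      else if (diffs.countP (fun d => decide (d < -1)) : Int) > 1 then some "multiple_inversions"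
      else none

-- ===== PRECONDITION & SPEC =====
def Spec_check_chain_anomaly_py (chain : List String) (out : Option String) : Prop := out = check_chain_anomaly_py_alt chain
instance (chain : List String) (out : Option String) : Decidable (Spec_check_chain_anomaly_py chain out) := by unfold Spec_check_chain_anomaly_py; infer_instance

-- ===== CLAIM (what is proved, stated in full; the proofs are below) =====
def Claim_equal_check_chain_anomaly_py : Prop := ∀ (chain : List String), Dom_check_chain_anomaly_py chain → Spec_check_chain_anomaly_py chain (check_chain_anomaly_py chain)

-- ===== LEMMAS AND PROOFS =====

-- A's running-state loop equals B's two reductions over the diff list of (prev :: known ranks of rest)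
theorem chainLoopA_eq (rest : List String) : ∀ (prev inv : Int),
    chainLoopA prev inv rest =
      (let rs := rest.filterMap (fun s => PySem.Dict.get? qualRanks s);
       let ds := List.zipWith (fun a b => b - a) (prev :: rs) rs;
       if ds.any (fun d => decide (d > 2)) then some "sharp_increase"
       else if inv + (ds.countP (fun d => decide (d < -1)) : Int) > 1 then some "multiple_inversions"
       else none) := by
  induction rest with
  | nil => intro prev inv; simp [chainLoopA]
  | cons q rest ih =>
    intro prev inv
    cases hq : PySem.Dict.get? qualRanks q with
    | none => simp [chainLoopA, hq, ih prev inv]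
    | some r =>
      simp only [chainLoopA, hq, List.filterMap_cons, List.zipWith]
      by_cases hs : r > prev + 2
      · simp [hs, show decide (r - prev > 2) = true by simp; omega]
      · rw [ih r (if r < prev - 1 then inv + 1 else inv)]
        have h1 : decide (r - prev > 2) = false := by simp; omega
        simp only [List.any_cons, List.countP_cons, h1, Bool.false_or]
        split_ifs with ha <;>
          simp_all <;> omega

theorem check_chain_anomaly_py_spec_aux (chain : List String) :
    check_chain_anomaly_py chain = check_chain_anomaly_py_alt chain := by
  cases chain with
  | nil => rfl
  | cons q rest =>
    cases hq : PySem.Dict.get? qualRanks q with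
    | none => simp [check_chain_anomaly_py, check_chain_anomaly_py_alt, hq]
    | some r =>
      simp only [check_chain_anomaly_py, check_chain_anomaly_py_alt, hq, Option.isNone_some,
        Bool.false_eq_true, if_false, List.filterMap_cons, List.tail_cons]
      rw [chainLoopA_eq rest r 0]
      simp

-- ===== VERDICT (by name: the statement is the Claim_ definition above) =====
theorem check_chain_anomaly_py_spec : Claim_equal_check_chain_anomaly_py := by
  intro chain _
  exact check_chain_anomaly_py_spec_aux chain
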